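-- pv_equiv track=rewrite | github.com/aashaka/sccl | sccl/topologies/distributed.py | _add_ext_switches
-- ===== SOURCE A (Python) =====
-- def _add_ext_switches(num_local, senders, receivers, remote_invbw):
--     switches = []
--     for sender in senders:
--         others_recv = [other for other in receivers if other//num_local != sender//num_local]
--         switches.append(([sender],others_recv,1,remote_invbw,f'node_{sender}_out'))
--     for receiver in receivers:
--         others_send = [other for other in senders if other//num_local != receiver//num_local]
--         switches.append((others_send,[receiver],1,remote_invbw,f'node_{receiver}_in'))
--     return switches
-- ===== SOURCE B (Python) =====
-- def _add_ext_switches(num_local, senders, receivers, remote_invbw):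
--     # Precompute, once per distinct node, the cross-node receiver/sender lists,
--     # then emit the switches by dictionary lookup.
--     recv_by_node = {}
--     for s in senders:
--         n = s // num_local
--         if n not in recv_by_node:
--             recv_by_node[n] = [r for r in receivers if r // num_local != n]
--     send_by_node = {}
--     for r in receivers:
--         n = r // num_local
--         if n not in send_by_node:
--             send_by_node[n] = [s for s in senders if s // num_local != n]
--     switches = []
--     for s in senders:
--         switches.append(([s], list(recv_by_node[s // num_local]), 1, remote_invbw, f'node_{s}_out'))
--     for r in receivers:
--         switches.append((list(send_by_node[r // num_local]), [r], 1, remote_invbw, f'node_{r}_in'))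
--     return switches
-- ===== Notes on version B (the rewrite author's own statement) =====
-- stated objective: faster
-- what changed: B precomputes the cross-node receiver/sender list once per distinct node in two dictionaries and emits the switches by lookup, instead of re-filtering the whole opposite list for every sender/receiver.
-- outside the precondition, e.g. on _add_ext_switches(0, [1], [], 5): A returns [([1], [], 1, 5, 'node_1_out')], B raises ZeroDivisionError
import Mathlib
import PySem

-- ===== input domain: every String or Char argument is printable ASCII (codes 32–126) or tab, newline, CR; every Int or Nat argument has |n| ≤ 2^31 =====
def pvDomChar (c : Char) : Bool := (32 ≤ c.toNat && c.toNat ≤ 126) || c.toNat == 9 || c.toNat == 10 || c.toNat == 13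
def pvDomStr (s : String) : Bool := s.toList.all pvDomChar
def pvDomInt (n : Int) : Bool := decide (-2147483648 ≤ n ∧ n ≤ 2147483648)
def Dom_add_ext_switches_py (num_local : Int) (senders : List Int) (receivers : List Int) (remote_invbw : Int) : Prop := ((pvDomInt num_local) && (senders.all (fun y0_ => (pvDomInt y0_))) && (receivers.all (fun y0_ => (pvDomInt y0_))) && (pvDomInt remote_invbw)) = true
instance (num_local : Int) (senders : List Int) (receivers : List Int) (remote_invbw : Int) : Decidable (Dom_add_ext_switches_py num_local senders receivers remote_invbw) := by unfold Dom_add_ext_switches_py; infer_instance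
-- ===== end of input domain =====

-- B replaces A's per-element re-filtering of the opposite list with two dictionaries,
-- built once per distinct node, and emits the switches by lookup (objective: faster).

-- ===== PORT A =====
def add_ext_switches_py (num_local : Int) (senders : List Int) (receivers : List Int) (remote_invbw : Int) : List (List Int × List Int × Int × Int × String) :=
  let switches :=
    senders.foldl (fun switches sender =>
      let others_recv := receivers.filter (fun other =>
        PySem.Int.floordiv other num_local != PySem.Int.floordiv sender num_local)
      switches ++ [([sender], others_recv, (1 : Int), remote_invbw,
        "node_" ++ PySem.Int.toStr sender ++ "_out")]) []
  receivers.foldl (fun switches receiver =>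
    let others_send := senders.filter (fun other =>
      PySem.Int.floordiv other num_local != PySem.Int.floordiv receiver num_local)
    switches ++ [(others_send, [receiver], (1 : Int), remote_invbw,
      "node_" ++ PySem.Int.toStr receiver ++ "_in")]) switches

-- ===== PORT B =====
-- dict build loop: for x in xs: n = x//num_local; if n not in d: d[n] = [y for y in ys if y//num_local != n]
def pvBuildByNode (num_local : Int) (ys : List Int) (xs : List Int) : PySem.Dict Int (List Int) :=
  xs.foldl (fun d x =>
    let n := PySem.Int.floordiv x num_local
    if d.contains n then d
    else d.insert n (ys.filter (fun y => PySem.Int.floordiv y num_local != n))) PySem.Dict.empty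

def add_ext_switches_py_alt (num_local : Int) (senders : List Int) (receivers : List Int) (remote_invbw : Int) : List (List Int × List Int × Int × Int × String) :=
  let recv_by_node := pvBuildByNode num_local receivers senders
  let send_by_node := pvBuildByNode num_local senders receivers
  let switches :=
    senders.foldl (fun switches s =>
      switches ++ [([s], recv_by_node.getD (PySem.Int.floordiv s num_local) [], (1 : Int),
        remote_invbw, "node_" ++ PySem.Int.toStr s ++ "_out")]) []
  receivers.foldl (fun switches r =>
    switches ++ [(send_by_node.getD (PySem.Int.floordiv r num_local) [], [r], (1 : Int),
      remote_invbw, "node_" ++ PySem.Int.toStr r ++ "_in")]) switches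

-- ===== PRECONDITION & SPEC =====
-- Pre_ excludes num_local = 0, where A either raises ZeroDivisionError (both lists nonempty)
-- or, with one list empty, returns a degenerate value while B naturally raises.
def Pre_add_ext_switches_py (num_local : Int) (senders : List Int) (receivers : List Int) (remote_invbw : Int) : Prop := num_local ≠ 0
instance (num_local : Int) (senders : List Int) (receivers : List Int) (remote_invbw : Int) : Decidable (Pre_add_ext_switches_py num_local senders receivers remote_invbw) := by unfold Pre_add_ext_switches_py; infer_instance

def pvWitness_add_ext_switches_py : Int × List Int × List Int × Int := (2, [0, 3], [1, 5], 7)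

def Spec_add_ext_switches_py (num_local : Int) (senders : List Int) (receivers : List Int) (remote_invbw : Int) (out : List (List Int × List Int × Int × Int × String)) : Prop := out = add_ext_switches_py_alt num_local senders receivers remote_invbw
instance (num_local : Int) (senders : List Int) (receivers : List Int) (remote_invbw : Int) (out : List (List Int × List Int × Int × Int × String)) : Decidable (Spec_add_ext_switches_py num_local senders receivers remote_invbw out) := by unfold Spec_add_ext_switches_py; infer_instance

-- ===== CLAIM (what is proved, stated in full; the proofs are below) =====
def Claim_equal_add_ext_switches_py : Prop := ∀ (num_local : Int) (senders : List Int) (receivers : List Int) (remote_invbw : Int), Dom_add_ext_switches_py num_local senders receivers remote_invbw → Pre_add_ext_switches_py num_local senders receivers remote_invbw → Spec_add_ext_switches_py num_local senders receivers remote_invbw (add_ext_switches_py num_local senders receivers remote_invbw)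

-- ===== LEMMAS AND PROOFS =====

-- A value already present survives the rest of the build loop.
lemma pvBuild_persist (num_local : Int) (ys : List Int) (xs : List Int)
    (d : PySem.Dict Int (List Int)) (k : Int) (v : List Int) (h : d.get? k = some v) :
    (xs.foldl (fun d x =>
      let n := PySem.Int.floordiv x num_local
      if d.contains n then d
      else d.insert n (ys.filter (fun y => PySem.Int.floordiv y num_local != n))) d).get? k = some v := by
  induction xs generalizing d with
  | nil => simpa using h
  | cons x xs ih =>
    simp only [List.foldl_cons]
    apply ih
    by_cases hc : d.contains (PySem.Int.floordiv x num_local)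
    · simpa [hc] using h
    · have hne : k ≠ PySem.Int.floordiv x num_local := by
        intro hk
        rw [hk] at h
        rw [PySem.Dict.contains_eq_isSome_get?, h] at hc
        simp at hc
      rw [if_neg hc, PySem.Dict.get?_insert_of_ne _ _ hne]
      exact h

-- The dictionary agrees with the per-node filter on every key it holds.
def pvGood (num_local : Int) (ys : List Int) (d : PySem.Dict Int (List Int)) : Prop :=
  ∀ k v, d.get? k = some v → v = ys.filter (fun y => PySem.Int.floordiv y num_local != k)

lemma pvBuild_lookup (num_local : Int) (ys : List Int) (xs : List Int)
    (d : PySem.Dict Int (List Int)) (hd : pvGood num_local ys d) (x : Int) (hx : x ∈ xs) :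
    (xs.foldl (fun d x =>
      let n := PySem.Int.floordiv x num_local
      if d.contains n then d
      else d.insert n (ys.filter (fun y => PySem.Int.floordiv y num_local != n))) d).get?
        (PySem.Int.floordiv x num_local)
      = some (ys.filter (fun y => PySem.Int.floordiv y num_local != PySem.Int.floordiv x num_local)) := by
  induction xs generalizing d with
  | nil => cases hx
  | cons a xs ih =>
    simp only [List.foldl_cons]
    have hstep : pvGood num_local ys
        (if d.contains (PySem.Int.floordiv a num_local) then d
         else d.insert (PySem.Int.floordiv a num_local)
           (ys.filter (fun y => PySem.Int.floordiv y num_local != PySem.Int.floordiv a num_local))) := by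
      by_cases hc : d.contains (PySem.Int.floordiv a num_local)
      · simpa [hc] using hd
      · intro k v hkv
        rw [if_neg hc] at hkv
        by_cases hk : k = PySem.Int.floordiv a num_local
        · subst hk
          rw [PySem.Dict.get?_insert_self] at hkv
          exact (Option.some.inj hkv).symm
        · rw [PySem.Dict.get?_insert_of_ne _ _ hk] at hkv
          exact hd k v hkv
    rcases List.mem_cons.mp hx with hxa | hxs
    · subst hxa
      apply pvBuild_persist
      by_cases hc : d.contains (PySem.Int.floordiv x num_local)
      · rw [if_pos hc] at *
        rw [PySem.Dict.contains_eq_isSome_get?] at hc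
        obtain ⟨v, hv⟩ := Option.isSome_iff_exists.mp hc
        rw [hv, hd _ _ hv]
      · rw [if_neg hc]
        exact PySem.Dict.get?_insert_self _ _ _
    · exact ih _ hstep hxs

lemma pvBuildByNode_getD (num_local : Int) (ys : List Int) (xs : List Int) (x : Int) (hx : x ∈ xs) :
    (pvBuildByNode num_local ys xs).getD (PySem.Int.floordiv x num_local) []
      = ys.filter (fun y => PySem.Int.floordiv y num_local != PySem.Int.floordiv x num_local) := by
  have h := pvBuild_lookup num_local ys xs PySem.Dict.empty
    (by intro k v hkv; simp [PySem.Dict.get?_empty] at hkv) x hx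
  unfold pvBuildByNode
  rw [PySem.Dict.getD_eq_get?_getD, h]
  rfl

-- ===== VERDICT (by name: the statement is the Claim_ definition above) =====
theorem add_ext_switches_py_spec : Claim_equal_add_ext_switches_py := by
  intro num_local senders receivers remote_invbw _ _
  unfold Spec_add_ext_switches_py add_ext_switches_py add_ext_switches_py_alt
  simp only [PySem.List.foldl_append_singleton_eq_map]
  congr 1
  · apply List.map_congr_left
    intro s hs
    rw [pvBuildByNode_getD num_local receivers senders s hs]
  · apply List.map_congr_left
    intro r hr
    rw [pvBuildByNode_getD num_local senders receivers r hr]
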